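-- pv_equiv track=rewrite | github.com/Gregofi/google_foobar | cake.py | solution
-- ===== SOURCE A (Python) =====
-- def solution(s):
-- 	size = len(s)
-- 	for slice_size in filter(lambda x : size % x == 0, range(1, size + 1)):
-- 		slices = size // slice_size
-- 		index = zip(range(0, slice_size*slices, slice_size), range(slice_size, slice_size*(slices + 1), slice_size))
-- 		splitted = [s[i:j] for i, j in index]
-- 		if(len(splitted) == splitted.count(splitted[0])):
-- 			return slices
-- ===== SOURCE B (Python) =====
-- def solution(s):
--     if not s:
--         return None
--     # smallest rotation period of s: first index >= 1 where s occurs in s+s.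
--     # It always divides len(s), and the maximal number of equal slices is len(s) // period.
--     p = (s + s).find(s, 1)
--     return len(s) // p
-- ===== Notes on version B (the rewrite author's own statement) =====
-- stated objective: faster
-- what changed: Instead of trying every divisor slice size and building and counting the list of slices, B computes the smallest rotation period p of s as (s+s).find(s, 1) (a single C-level substring search); p always divides len(s) and the answer is len(s)//p.
import Mathlib
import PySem

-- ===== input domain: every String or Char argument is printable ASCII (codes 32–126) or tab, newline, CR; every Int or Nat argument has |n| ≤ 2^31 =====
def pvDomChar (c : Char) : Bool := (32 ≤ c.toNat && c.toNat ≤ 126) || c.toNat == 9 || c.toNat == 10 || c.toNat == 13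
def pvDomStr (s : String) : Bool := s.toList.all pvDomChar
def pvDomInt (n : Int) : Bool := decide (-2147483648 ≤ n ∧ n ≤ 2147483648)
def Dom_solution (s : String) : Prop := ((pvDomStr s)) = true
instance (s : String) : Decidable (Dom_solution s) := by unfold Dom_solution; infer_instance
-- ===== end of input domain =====

-- B replaces A's divisor-by-divisor slice-splitting search by a single substring search
-- (s+s).find(s, 1) for the smallest rotation period, which always divides len(s).

-- ===== PORT A =====
-- the 'for slice_size in filter(...)' loop of A, one candidate slice size at a time.
-- 'splitted[0]' is ported as pyGetD splitted 0 []: inside the loop splitted is never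
-- empty (size > 0 and slice_size divides size), so Python never raises there.
def solutionLoop (cs : List Char) (size : Int) : List Int → Option Int
  | [] => none
  | k :: rest =>
    let slices := PySem.Int.floordiv size k
    let index := (PySem.List.pyRange 0 (k * slices) k).zip
        (PySem.List.pyRange k (k * (slices + 1)) k)
    let splitted := index.map fun ij => PySem.List.slice cs (some ij.1) (some ij.2)
    if splitted.length = PySem.List.count splitted (PySem.List.pyGetD splitted 0 []) then
      some slices
    else
      solutionLoop cs size rest

def solution (s : String) : Option Int :=
  let size := PySem.Str.len s
  solutionLoop s.toList size
    ((PySem.List.pyRange 1 (size + 1) 1).filter fun x => PySem.Int.mod size x == 0)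

-- ===== PORT B =====
def solution_alt (s : String) : Option Int :=
  let cs := s.toList
  if cs.isEmpty then none
  else
    let p := PySem.Chars.findFrom (cs ++ cs) cs 1 none
    some (PySem.Int.floordiv (PySem.Str.len s) p)

-- ===== PRECONDITION & SPEC =====
def Spec_solution (s : String) (out : Option Int) : Prop := out = solution_alt s
instance (s : String) (out : Option Int) : Decidable (Spec_solution s out) := by unfold Spec_solution; infer_instance

-- ===== CLAIM (what is proved, stated in full; the proofs are below) =====
def Claim_equal_solution : Prop := ∀ (s : String), Dom_solution s → Spec_solution s (solution s)

-- ===== LEMMAS AND PROOFS =====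

-- dropping i whole blocks from m concatenated copies of t leaves m - i copies
lemma pv_drop_flatten_replicate (t : List Char) (m i : Nat) (h : i ≤ m) :
    ((List.replicate m t).flatten).drop (t.length * i) = (List.replicate (m - i) t).flatten := by
  induction i with
  | zero => simp
  | succ i ih =>
    have hi : i ≤ m := Nat.le_of_succ_le h
    have h1 : t.length * (i + 1) = t.length * i + t.length := by ring
    rw [h1, ← List.drop_drop, ih hi]
    obtain ⟨j, hj⟩ : ∃ j, m - i = j + 1 := ⟨m - (i + 1), by omega⟩
    rw [hj, List.replicate_succ, List.flatten_cons, List.drop_append_of_le_length le_rfl,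
      List.drop_length, List.nil_append]
    have hj2 : m - (i + 1) = j := by omega
    rw [hj2]

-- every aligned block of m concatenated copies of t is t
lemma pv_take_drop_flatten_replicate (t : List Char) (m i : Nat) (h : i < m) :
    (((List.replicate m t).flatten).drop (t.length * i)).take t.length = t := by
  rw [pv_drop_flatten_replicate t m i (le_of_lt h)]
  obtain ⟨j, hj⟩ : ∃ j, m - i = j + 1 := ⟨m - (i + 1), by omega⟩
  rw [hj, List.replicate_succ, List.flatten_cons, List.take_append_of_le_length le_rfl,
    List.take_length]

-- if all m aligned k-blocks of l equal the first one, l is m copies of its k-prefix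
lemma pv_rep_of_chunks (k : Nat) :
    ∀ (m : Nat) (l : List Char), l.length = k * m →
      (∀ i < m, (l.drop (k * i)).take k = l.take k) →
      l = (List.replicate m (l.take k)).flatten := by
  intro m
  induction m with
  | zero => intro l hlen _; simp_all
  | succ m ih =>
    intro l hlen hch
    rcases Nat.eq_zero_or_pos m with hm0 | hm0
    · subst hm0
      have hl1 : l.take k = l := List.take_of_length_le (by omega)
      simp [hl1]
    have hkl : k ≤ l.length := by rw [hlen]; nlinarith
    have hd : (l.drop k).length = k * m := by
      have e : k * (m + 1) = k * m + k := by ring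
      rw [List.length_drop, hlen, e]
      omega
    have htk : (l.drop k).take k = l.take k := by
      have h1 := hch 1 (by omega)
      simpa using h1
    have hrest : l.drop k = (List.replicate m ((l.drop k).take k)).flatten := by
      apply ih (l.drop k) hd
      intro i hi
      have h2 := hch (i + 1) (by omega)
      rw [htk, List.drop_drop]
      have harith : k + k * i = k * (i + 1) := by ring
      rw [harith]
      exact h2
    calc l = l.take k ++ l.drop k := (List.take_append_drop k l).symm
    _ = l.take k ++ (List.replicate m (l.take k)).flatten := by rw [hrest, htk]
    _ = (List.replicate (m + 1) (l.take k)).flatten := by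
        rw [List.replicate_succ, List.flatten_cons]

-- m copies of the k-prefix have all aligned k-blocks equal to it
lemma pv_chunks_of_rep (k : Nat) (m : Nat) (l : List Char)
    (hkl : k ≤ l.length)
    (hrep : l = (List.replicate m (l.take k)).flatten) :
    ∀ i < m, (l.drop (k * i)).take k = l.take k := by
  intro i hi
  have hlt : (l.take k).length = k := by simp [hkl]
  have hblk := pv_take_drop_flatten_replicate (l.take k) m i hi
  rw [hlt] at hblk
  conv_lhs => rw [hrep]
  exact hblk

-- a k-rotation fixed point with k ∣ |l| is |l|/k copies of its k-prefix
lemma pv_rep_of_rot (k : Nat) (hk : 0 < k) :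
    ∀ (N : Nat), ∀ l : List Char, l.length = N → k ∣ N → l.drop k ++ l.take k = l →
      l = (List.replicate (N / k) (l.take k)).flatten := by
  intro N
  induction N using Nat.strong_induction_on with
  | _ N ih =>
    intro l hlen hdvd hrot
    obtain ⟨m, hm⟩ := hdvd
    rcases m with _ | m
    · have hN : N = 0 := by omega
      subst hN
      have hl0 : l = [] := List.length_eq_zero_iff.mp (by omega)
      subst hl0
      simp
    rcases m with _ | m
    · have hN : N = k := by omega
      have h1 : N / k = 1 := by rw [hN, Nat.div_self hk]
      have h2 : l.take k = l := by
        rw [show k = l.length by omega, List.take_length]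
      rw [h1, h2]
      simp
    · -- m + 2 copies
      have hkN : k < N := by nlinarith
      have hkl : k ≤ l.length := by omega
      have htl : (l.take k).length = k := by simp [hkl]
      have hdl : (l.drop k).length = N - k := by simp [hlen]
      have hcomm : l.drop k ++ l.take k = l.take k ++ l.drop k := by
        rw [hrot, List.take_append_drop]
      have hkd : k ≤ (l.drop k).length := by
        have h2k : 2 * k ≤ N := by nlinarith
        omega
      have htd : (l.drop k).take k = l.take k := by
        rw [← List.take_append_of_le_length hkd (l₂ := l.take k), hcomm,
          List.take_append_of_le_length (le_of_eq htl.symm)]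
        simp [List.take_take]
      have hdl2 : (l.take k ++ l.drop k).drop k = l.drop k := List.drop_left' htl
      have hdd : (l.drop k).drop k ++ (l.drop k).take k = l.drop k := by
        rw [htd, ← List.drop_append_of_le_length hkd (l₂ := l.take k), hcomm, hdl2]
      have hNk : N - k = k * (m + 1) := by
        have e2 : k * (m + 1 + 1) = k * (m + 1) + k := by ring
        omega
      have hrest := ih (N - k) (by omega) (l.drop k) hdl ⟨m + 1, hNk⟩ hdd
      rw [htd] at hrest
      have hdiv1 : (N - k) / k = m + 1 := by
        rw [hNk, Nat.mul_div_cancel_left _ hk]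
      have hdiv2 : N / k = m + 2 := by rw [hm, Nat.mul_div_cancel_left _ hk]
      rw [hdiv1] at hrest
      rw [hdiv2]
      calc l = l.take k ++ l.drop k := (List.take_append_drop k l).symm
      _ = l.take k ++ (List.replicate (m + 1) (l.take k)).flatten := by rw [← hrest]
      _ = (List.replicate (m + 2) (l.take k)).flatten := by
          rw [List.replicate_succ (n := m + 1), List.flatten_cons]

-- m ≥ 1 copies of the k-prefix are a k-rotation fixed point
lemma pv_rot_of_rep (k : Nat) (m : Nat) (hm : 0 < m) (l : List Char)
    (hkl : k ≤ l.length)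
    (hrep : l = (List.replicate m (l.take k)).flatten) :
    l.drop k ++ l.take k = l := by
  have htl : (l.take k).length = k := by simp [hkl]
  obtain ⟨j, hj⟩ : ∃ j, m = j + 1 := ⟨m - 1, by omega⟩
  set t := l.take k with ht
  have h1 : ((List.replicate (j + 1) t).flatten).drop k = (List.replicate j t).flatten := by
    rw [List.replicate_succ, List.flatten_cons, List.drop_left' htl]
  have h2 : (List.replicate j t).flatten ++ t = (List.replicate (j + 1) t).flatten := by
    rw [List.replicate_succ' (n := j), List.flatten_append]
    simp
  calc l.drop k ++ t
      = ((List.replicate (j + 1) t).flatten).drop k ++ t := by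
        conv_lhs => rw [hrep, hj]
    _ = (List.replicate j t).flatten ++ t := by rw [h1]
    _ = (List.replicate (j + 1) t).flatten := h2
    _ = l := by conv_rhs => rw [hrep, hj]

-- the slice test of A at a divisor k is exactly "l is fixed by rotation by k"
lemma pv_chunks_iff_rot (l : List Char) (k : Nat) (hk : 0 < k) (hkn : k ≤ l.length)
    (hdvd : k ∣ l.length) :
    ((∀ i < l.length / k, (l.drop (k * i)).take k = l.take k) ↔ l.rotate k = l) := by
  obtain ⟨m, hm⟩ := hdvd
  have hdiv : l.length / k = m := by rw [hm, Nat.mul_div_cancel_left _ hk]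
  have hm1 : 0 < m := by nlinarith
  rw [hdiv, List.rotate_eq_drop_append_take hkn]
  constructor
  · intro h
    exact pv_rot_of_rep k m hm1 l hkn (pv_rep_of_chunks k m l hm h)
  · intro h
    have hrep := pv_rep_of_rot k hk l.length l rfl ⟨m, hm⟩ h
    rw [hdiv] at hrep
    exact pv_chunks_of_rep k m l hkn hrep

-- iterated rotation by a fixed point's period
lemma pv_rot_mul (l : List Char) (p : Nat) (h : l.rotate p = l) :
    ∀ q, l.rotate (q * p) = l := by
  intro q
  induction q with
  | zero => simp
  | succ q ih =>
    have e : (q + 1) * p = q * p + p := by ring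
    rw [e, ← List.rotate_rotate, ih, h]

-- the least positive rotation period divides the length
lemma pv_period_dvd (l : List Char) (p : Nat) (hp : 0 < p) (h : l.rotate p = l)
    (hmin : ∀ j, 0 < j → j < p → l.rotate j ≠ l) : p ∣ l.length := by
  have hmod : l.rotate (l.length % p) = l := by
    have e : l.length / p * p + l.length % p = l.length := by
      rw [mul_comm (l.length / p) p]
      exact Nat.div_add_mod _ _
    have h2 : (l.rotate (l.length / p * p)).rotate (l.length % p) = l := by
      rw [List.rotate_rotate, e, List.rotate_length]
    rwa [pv_rot_mul l p h (l.length / p)] at h2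
  rcases Nat.eq_zero_or_pos (l.length % p) with h0 | h0
  · exact Nat.dvd_of_mod_eq_zero h0
  · exact absurd hmod (hmin _ h0 (Nat.mod_lt _ hp))

-- "l occurs at offset j in l++l" is "l is fixed by rotation by j"
lemma pv_prefix_drop_iff (l : List Char) (j : Nat) (hj : j ≤ l.length) :
    (l <+: (l ++ l).drop j) ↔ l.rotate j = l := by
  rw [List.drop_append_of_le_length hj, List.rotate_eq_drop_append_take hj]
  constructor
  · intro h
    have heq := List.prefix_iff_eq_take.mp h
    rw [List.take_append, List.take_of_length_le (by simp)] at heq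
    have hjj : l.length - (l.drop j).length = j := by simp; omega
    rw [hjj] at heq
    exact heq.symm
  · intro h
    refine ⟨l.drop j, ?_⟩
    calc l ++ l.drop j = (l.drop j ++ l.take j) ++ l.drop j := by rw [h]
    _ = l.drop j ++ (l.take j ++ l.drop j) := by rw [List.append_assoc]
    _ = l.drop j ++ l := by rw [List.take_append_drop]

-- the block count (K*m + K - 1) / K of range(a, a + K*m, K)
lemma pv_natdiv (K m : Nat) (h : 0 < K) : (K * m + K - 1) / K = m := by
  obtain ⟨K', rfl⟩ : ∃ K', K = K' + 1 := ⟨K - 1, by omega⟩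
  have e1 : (K' + 1) * m + (K' + 1) - 1 = K' + (K' + 1) * m := by omega
  rw [e1, Nat.add_mul_div_left _ _ (by omega), Nat.div_eq_of_lt (by omega)]
  omega

-- the loop condition of A at candidate k, rewritten to "rotation by k fixes l"
lemma pv_condA (l : List Char) (k : Int) (hk1 : 1 ≤ k) (hkn : k ≤ (l.length : Int))
    (hdvd : k ∣ (l.length : Int)) :
    ((((PySem.List.pyRange 0 (k * PySem.Int.floordiv (l.length : Int) k) k).zip
        (PySem.List.pyRange k (k * (PySem.Int.floordiv (l.length : Int) k + 1)) k)).map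
        fun ij => PySem.List.slice l (some ij.1) (some ij.2)).length =
      PySem.List.count
        (((PySem.List.pyRange 0 (k * PySem.Int.floordiv (l.length : Int) k) k).zip
          (PySem.List.pyRange k (k * (PySem.Int.floordiv (l.length : Int) k + 1)) k)).map
          fun ij => PySem.List.slice l (some ij.1) (some ij.2))
        (PySem.List.pyGetD
          (((PySem.List.pyRange 0 (k * PySem.Int.floordiv (l.length : Int) k) k).zip
            (PySem.List.pyRange k (k * (PySem.Int.floordiv (l.length : Int) k + 1)) k)).map
            fun ij => PySem.List.slice l (some ij.1) (some ij.2))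
          0 []))
    ↔ l.rotate k.toNat = l := by
  set K := k.toNat with hK
  have hk0 : (0 : Int) < k := by omega
  have hKk : k = (K : Int) := by omega
  have hKpos : 0 < K := by omega
  have hKn : K ≤ l.length := by omega
  have hKdvd : K ∣ l.length := by
    have hdK : (K : Int) ∣ (l.length : Int) := hKk ▸ hdvd
    exact_mod_cast hdK
  set n := l.length with hn
  obtain ⟨m, hm⟩ := hKdvd
  have hm1 : 0 < m := by nlinarith
  have hdivn : n / K = m := by rw [hm, Nat.mul_div_cancel_left _ hKpos]
  have hfd : PySem.Int.floordiv (n : Int) k = (m : Int) := by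
    rw [hKk, PySem.Int.floordiv_natCast, hdivn]
  have h1le : 1 ≤ K * m + K := by nlinarith
  have hnatdiv : (K * m + K - 1) / K = m := pv_natdiv K m hKpos
  have hcnt : ∀ a b : Int, a + k * (m : Int) = b → a < b →
      PySem.List.pyRange a b k = (List.range m).map fun (i : Nat) => a + k * (i : Int) := by
    intro a b hab hlt
    rw [PySem.List.pyRange_of_pos a b hk0, if_pos hlt]
    have hcast : ((K * m + K - 1 : Nat) : Int) = (K : Int) * (m : Int) + (K : Int) - 1 := by
      rw [Nat.cast_sub h1le]
      push_cast
      ring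
    have hcount : ((b - a + k - 1) / k).toNat = m := by
      have hb : b - a + k - 1 = ((K * m + K - 1 : Nat) : Int) := by
        rw [hcast, ← hab, hKk]
        ring
      rw [hb, hKk, ← Int.natCast_div, hnatdiv, Int.toNat_natCast]
    rw [hcount]
  have hr1 : PySem.List.pyRange 0 (k * PySem.Int.floordiv (n : Int) k) k =
      (List.range m).map fun (i : Nat) => 0 + k * (i : Int) := by
    rw [hfd]
    exact hcnt 0 (k * (m : Int)) (by ring) (by nlinarith)
  have hr2 : PySem.List.pyRange k (k * (PySem.Int.floordiv (n : Int) k + 1)) k =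
      (List.range m).map fun (i : Nat) => k + k * (i : Int) := by
    rw [hfd]
    exact hcnt k (k * ((m : Int) + 1)) (by ring) (by nlinarith)
  rw [hr1, hr2, List.zip_map', List.map_map]
  have hslice : ∀ i : Nat,
      ((fun ij : Int × Int => PySem.List.slice l (some ij.1) (some ij.2)) ∘
        fun (i : Nat) => ((0 : Int) + k * (i : Int), k + k * (i : Int))) i =
      (l.drop (K * i)).take K := by
    intro i
    have h1 : (0 : Int) + k * (i : Int) = ((K * i : Nat) : Int) := by
      rw [hKk]; push_cast; ring
    have h2 : k + k * (i : Int) = ((K * i : Nat) : Int) + ((K : Nat) : Int) := by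
      rw [hKk]; push_cast; ring
    simp only [Function.comp_apply, h1, h2, PySem.List.slice_natCast_add]
  rw [List.map_congr_left fun i _ => hslice i]
  obtain ⟨m', hm'⟩ : ∃ m', m = m' + 1 := ⟨m - 1, by omega⟩
  have hhead : PySem.List.pyGetD
      ((List.range m).map fun (i : Nat) => (l.drop (K * i)).take K) 0 [] = l.take K := by
    rw [PySem.List.pyGetD_zero, hm', List.range_succ_eq_map, List.map_cons]
    simp
  rw [hhead, PySem.List.count_eq, List.length_map, List.length_range]
  have hcount2 :
      (List.count (l.take K) ((List.range m).map fun (i : Nat) => (l.drop (K * i)).take K) = m)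
      ↔ ∀ i < m, (l.drop (K * i)).take K = l.take K := by
    constructor
    · intro h i hi
      have hall := List.count_eq_length.mp (by rw [h]; simp)
      exact (hall _ (List.mem_map.mpr ⟨i, List.mem_range.mpr hi, rfl⟩)).symm
    · intro h
      rw [List.count_eq_length.mpr ?_]
      · simp
      · intro b hb
        obtain ⟨i, hi, rfl⟩ := List.mem_map.mp hb
        exact (h i (List.mem_range.mp hi)).symm
  rw [← pv_chunks_iff_rot l K hKpos hKn ⟨m, hm⟩, hdivn]
  constructor
  · intro h
    exact hcount2.mp h.symm
  · intro h
    exact (hcount2.mpr h).symm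

-- A's loop over the ascending divisor candidates stops exactly at the least period P
lemma pv_loop_eq (l : List Char) (P : Nat)
    (hrot : l.rotate P = l)
    (hmin : ∀ j, 0 < j → j < P → l.rotate j ≠ l) :
    ∀ cs : List Int, cs.Pairwise (· < ·) →
      (∀ c ∈ cs, 1 ≤ c ∧ c ≤ (l.length : Int) ∧ c ∣ (l.length : Int)) →
      ((P : Int) ∈ cs) →
      solutionLoop l (l.length : Int) cs = some (PySem.Int.floordiv (l.length : Int) (P : Int)) := by
  intro cs
  induction cs with
  | nil => intro _ _ h; simp at h
  | cons c rest ih =>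
    intro hpw hall hPmem
    obtain ⟨h1, h2, h3⟩ := hall c List.mem_cons_self
    have hcond := pv_condA l c h1 h2 h3
    simp only [solutionLoop]
    by_cases hc : c = (P : Int)
    · subst hc
      rw [if_pos (hcond.mpr (by simpa using hrot))]
    · have hPrest : (P : Int) ∈ rest := by
        rcases List.mem_cons.mp hPmem with hx | hx
        · exact absurd hx.symm hc
        · exact hx
      have hlt : c < (P : Int) := (List.pairwise_cons.mp hpw).1 _ hPrest
      rw [if_neg (fun hcontra => hmin c.toNat (by omega) (by omega) (hcond.mp hcontra))]
      exact ih (List.pairwise_cons.mp hpw).2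
        (fun x hx => hall x (List.mem_cons_of_mem _ hx)) hPrest

-- main argument for a nonempty string
lemma pv_core (s : String) (hne : s.toList ≠ []) : solution s = solution_alt s := by
  set l := s.toList with hl
  have hn : 0 < l.length := List.length_pos_iff.mpr hne
  set n := l.length with hnn
  have h2n : 1 ≤ (l ++ l).length := by simp; omega
  have hnm1 : PySem.Chars.findFrom (l ++ l) l ((1 : Nat) : Int) none ≠ -1 := by
    rw [Ne, PySem.Chars.findFrom_natCast_eq_neg_one_iff (l ++ l) l 1 h2n]
    intro hinf
    apply hinf
    rw [List.drop_append_of_le_length (by omega)]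
    exact (List.suffix_append _ _).isInfix
  have hspec := PySem.Chars.findFrom_natCast_spec (l ++ l) l 1 h2n hnm1
  set p := PySem.Chars.findFrom (l ++ l) l ((1 : Nat) : Int) none with hp
  obtain ⟨hp1, hpref, hminp⟩ := hspec
  set P := p.toNat with hP
  have hP1 : 0 < P := by omega
  have hpP : p = (P : Int) := by omega
  have hPn : P ≤ n := by
    by_contra hgt
    rw [Nat.not_le] at hgt
    have hnp := hminp n (by omega) (by omega)
    rw [List.drop_append_of_le_length le_rfl, List.drop_length, List.nil_append] at hnp
    exact hnp (List.prefix_refl l)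
  have hrot : l.rotate P = l := (pv_prefix_drop_iff l P hPn).mp hpref
  have hmin : ∀ j, 0 < j → j < P → l.rotate j ≠ l := by
    intro j hj0 hjP hrj
    exact hminp j (by omega) (by omega) ((pv_prefix_drop_iff l j (by omega)).mpr hrj)
  have hdvdI : ((P : Int)) ∣ (n : Int) :=
    Int.natCast_dvd_natCast.mpr (pv_period_dvd l P hP1 hrot hmin)
  have hlen : PySem.Str.len s = (n : Int) := by
    rw [PySem.Str.len_eq, ← hl, ← hnn]
  have hPmem : (P : Int) ∈ (PySem.List.pyRange 1 ((n : Int) + 1) 1).filter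
      fun x => PySem.Int.mod (n : Int) x == 0 := by
    rw [List.mem_filter]
    refine ⟨?_, ?_⟩
    · rw [PySem.List.mem_pyRange_one]
      omega
    · simpa [beq_iff_eq, PySem.Int.mod_eq_zero_iff_dvd] using hdvdI
  have hpw : ((PySem.List.pyRange 1 ((n : Int) + 1) 1).filter
      fun x => PySem.Int.mod (n : Int) x == 0).Pairwise (· < ·) :=
    (PySem.List.pairwise_lt_pyRange_one 1 ((n : Int) + 1)).filter _
  have hall : ∀ c ∈ (PySem.List.pyRange 1 ((n : Int) + 1) 1).filter
      (fun x => PySem.Int.mod (n : Int) x == 0),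
      1 ≤ c ∧ c ≤ (n : Int) ∧ c ∣ (n : Int) := by
    intro c hc
    rw [List.mem_filter, PySem.List.mem_pyRange_one] at hc
    refine ⟨hc.1.1, by omega, ?_⟩
    simpa [beq_iff_eq, PySem.Int.mod_eq_zero_iff_dvd] using hc.2
  show (let size := PySem.Str.len s
    solutionLoop s.toList size
      ((PySem.List.pyRange 1 (size + 1) 1).filter fun x => PySem.Int.mod size x == 0)) =
    solution_alt s
  simp only [hlen, ← hl]
  rw [pv_loop_eq l P hrot hmin _ hpw hall hPmem]
  show _ = (let cs := s.toList
    if cs.isEmpty then none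
    else
      let q := PySem.Chars.findFrom (cs ++ cs) cs 1 none
      some (PySem.Int.floordiv (PySem.Str.len s) q))
  simp only [← hl]
  rw [if_neg (by simpa [List.isEmpty_iff] using hne)]
  rw [hlen, show PySem.Chars.findFrom (l ++ l) l 1 none = (P : Int) from hpP ▸ hp ▸ rfl]

-- ===== VERDICT (by name: the statement is the Claim_ definition above) =====
theorem solution_spec : Claim_equal_solution := by
  unfold Claim_equal_solution
  intro s _
  unfold Spec_solution
  by_cases h : s.toList = []
  · unfold solution solution_alt
    have hlen : PySem.Str.len s = 0 := by rw [PySem.Str.len_eq, h]; simp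
    simp only [h, hlen]
    rw [PySem.List.pyRange_one_eq_nil (by norm_num)]
    simp [solutionLoop]
  · exact pv_core s h
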